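-- pv_equiv track=rewrite | github.com/Agrim2210/DSA-Problem-Solving | Queue/Day14_Longest_Subarray_abs_diff.py | abs_diff
-- ===== SOURCE A (Python) =====
-- from collections import deque
--
-- def abs_diff(nums,limit):
--     max_dq=deque()
--     min_dq=deque()
--     left=0
--     ans=0
--     for right in range(len(nums)):
--         while max_dq and nums[max_dq[-1]]<nums[right]:
--             max_dq.pop()
--         max_dq.append(right)
--         while min_dq and nums[min_dq[-1]]>nums[right]:
--             min_dq.pop()
--         min_dq.append(right)
--         while nums[max_dq[0]]-nums[min_dq[0]]>limit:
--             if max_dq[0]==left: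
--                 max_dq.popleft()
--             if min_dq[0]==left:
--                 min_dq.popleft()
--             left+=1
--         ans=max(ans,right-left+1)
--     return ans
-- ===== SOURCE B (Python) =====
-- def abs_diff(nums, limit):
--     window = []
--     ans = 0
--     for x in nums:
--         window.append(x)
--         while window and max(window) - min(window) > limit:
--             window.pop(0)
--         ans = max(ans, len(window))
--     return ans
-- ===== Notes on version B (the rewrite author's own statement) =====
-- stated objective: simpler
-- what changed: Replaces the two monotonic index deques by keeping the window itself as a plain list and recomputing max/min with the built-ins while shrinking, so no index bookkeeping (no left pointer, no deque maintenance) is needed.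
import Mathlib
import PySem

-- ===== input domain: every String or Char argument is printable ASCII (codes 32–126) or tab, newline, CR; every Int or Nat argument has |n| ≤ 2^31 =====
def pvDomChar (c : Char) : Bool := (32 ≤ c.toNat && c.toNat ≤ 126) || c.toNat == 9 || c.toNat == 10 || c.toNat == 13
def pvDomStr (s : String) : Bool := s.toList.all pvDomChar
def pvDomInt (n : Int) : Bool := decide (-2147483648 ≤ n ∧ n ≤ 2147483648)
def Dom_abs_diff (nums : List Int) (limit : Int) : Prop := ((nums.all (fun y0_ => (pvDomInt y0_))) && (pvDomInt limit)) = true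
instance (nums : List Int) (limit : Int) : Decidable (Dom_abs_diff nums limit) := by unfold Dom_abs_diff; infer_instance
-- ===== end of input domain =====

-- B drops A's two monotonic index deques and keeps the window itself as a plain list, recomputing
-- max/min while shrinking: simpler (no left pointer, no deque maintenance), not faster.

-- ===== PORT A =====
-- Deques are stored REVERSED: head = Python's back (so append/pop at the back are cons/dropWhile,
-- and Python's front dq[0]/popleft are getLast?/dropLast).
-- The outer 'while nums[max_dq[0]]-nums[min_dq[0]]>limit' shrink loop is ported with fuel
-- nums.length + 1 (a totality guard only; it suffices on every input admitted by Pre_).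
-- If a deque is empty where Python would evaluate dq[0] (IndexError, excluded by Pre_),
-- the loop gets stuck and returns the current state.
def pvShrinkA (nums : List Int) (limit : Int) :
    Nat → List Nat → List Nat → Nat → List Nat × List Nat × Nat
  | 0, maxDq, minDq, left => (maxDq, minDq, left)
  | fuel + 1, maxDq, minDq, left =>
    match maxDq.getLast?, minDq.getLast? with
    | some mf, some nf =>
      if nums.getD mf 0 - nums.getD nf 0 > limit then
        pvShrinkA nums limit fuel
          (if mf = left then maxDq.dropLast else maxDq)
          (if nf = left then minDq.dropLast else minDq)
          (left + 1)
      else (maxDq, minDq, left)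
    | _, _ => (maxDq, minDq, left)

-- one iteration of 'for right in range(len(nums))': state = (max_dq, min_dq, left, ans)
def pvStepA (nums : List Int) (limit : Int)
    (st : List Nat × List Nat × Nat × Int) (r : Nat) : List Nat × List Nat × Nat × Int :=
  let x := nums.getD r 0
  let maxDq := r :: st.1.dropWhile (fun i => decide (nums.getD i 0 < x))
  let minDq := r :: st.2.1.dropWhile (fun i => decide (x < nums.getD i 0))
  let p := pvShrinkA nums limit (nums.length + 1) maxDq minDq st.2.2.1
  (p.1, p.2.1, p.2.2, max st.2.2.2 ((r : Int) - (p.2.2 : Int) + 1))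

def abs_diff (nums : List Int) (limit : Int) : Int :=
  ((List.range nums.length).foldl (pvStepA nums limit) ([], [], 0, 0)).2.2.2

-- ===== PORT B =====
-- 'while window and max(window) - min(window) > limit: window.pop(0)'
-- (window list with head = Python's front; pop(0) = tail, structural recursion)
def pvShrinkB (limit : Int) : List Int → List Int
  | [] => []
  | a :: t =>
    match PySem.List.max? (a :: t) (fun y => y), PySem.List.min? (a :: t) (fun y => y) with
    | some mx, some mn => if mx - mn > limit then pvShrinkB limit t else a :: t
    | _, _ => a :: t   -- unreachable (the list is nonempty); totality guard

-- one iteration of 'for x in nums': state = (window, ans)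
def pvStepB (limit : Int) (st : List Int × Int) (x : Int) : List Int × Int :=
  let w := pvShrinkB limit (st.1 ++ [x])
  (w, max st.2 (w.length : Int))

def abs_diff_alt (nums : List Int) (limit : Int) : Int :=
  (nums.foldl (pvStepB limit) ([], 0)).2

-- ===== PRECONDITION & SPEC =====
-- Pre_ excludes exactly the inputs on which Python A raises: for nonempty nums and limit < 0 the
-- shrink loop drains both deques (a single-element window already violates the limit) and
-- nums[max_dq[0]] raises IndexError.
def Pre_abs_diff (nums : List Int) (limit : Int) : Prop := nums = [] ∨ 0 ≤ limit
instance (nums : List Int) (limit : Int) : Decidable (Pre_abs_diff nums limit) := by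
  unfold Pre_abs_diff; infer_instance
def pvWitness_abs_diff : List Int × Int := ([4, 1, 7, 7, 2], 3)

def Spec_abs_diff (nums : List Int) (limit : Int) (out : Int) : Prop := out = abs_diff_alt nums limit
instance (nums : List Int) (limit : Int) (out : Int) : Decidable (Spec_abs_diff nums limit out) := by
  unfold Spec_abs_diff; infer_instance

-- ===== CLAIM (what is proved, stated in full; the proofs are below) =====
def Claim_equal_abs_diff : Prop := ∀ (nums : List Int) (limit : Int), Dom_abs_diff nums limit →
  Pre_abs_diff nums limit → Spec_abs_diff nums limit (abs_diff nums limit)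

-- ===== LEMMAS AND PROOFS =====

-- The monotone deque, characterised: indices i ∈ [left, r) such that no later index of the
-- window carries an f-greater value (f = nums.getD · 0 for max_dq, its negation for min_dq).
def pvCand (f : Nat → Int) (left r : Nat) : List Nat :=
  (List.range r).filter (fun i => decide (left ≤ i) &&
    decide (∀ j ∈ List.range r, i < j → f j ≤ f i))

-- the window nums[left:r], as f-values
def pvWin (f : Nat → Int) (left r : Nat) : List Int := (List.range' left (r - left)).map f

lemma pvCand_sorted (f : Nat → Int) (left r : Nat) :
    (pvCand f left r).Pairwise (· < ·) := by
  exact List.pairwise_lt_range.filter _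

lemma pvCand_mem {f : Nat → Int} {left r i : Nat} (h : i ∈ pvCand f left r) :
    left ≤ i ∧ i < r ∧ ∀ j, i < j → j < r → f j ≤ f i := by
  unfold pvCand at h
  have h1 := List.of_mem_filter h
  have h2 := List.mem_of_mem_filter h
  simp only [List.mem_range, Bool.and_eq_true, decide_eq_true_eq] at h1 h2
  exact ⟨h1.1, h2, fun j hij hjr => h1.2 j hjr hij⟩

lemma pvCand_anti (f : Nat → Int) (left r : Nat) :
    (pvCand f left r).Pairwise (fun i j => f j ≤ f i) := by
  refine (pvCand_sorted f left r).imp_of_mem ?_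
  intro a b ha hb hab
  exact (pvCand_mem ha).2.2 b hab (pvCand_mem hb).2.1

lemma pv_dropWhile_eq_filter {α : Type} {p : α → Bool} {l : List α}
    (h : l.Pairwise (fun a b => p b = true → p a = true)) :
    l.dropWhile p = l.filter (fun a => !p a) := by
  induction l with
  | nil => rfl
  | cons a t ih =>
    rcases List.pairwise_cons.mp h with ⟨hhead, htail⟩
    by_cases hp : p a = true
    · simp [hp, ih htail]
    · have : ∀ b ∈ t, p b = false := fun b hb => by
        rcases Bool.eq_false_or_eq_true (p b) with h' | h'
        · exact absurd (hhead b hb h') hp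
        · exact h'
      simp only [Bool.not_eq_true] at hp
      simp [hp]
      refine (List.filter_eq_self.mpr ?_).symm
      intro b hb; simp [this b hb]

-- appending index r: Python's pop-from-back while + append
lemma pvCand_append (f : Nat → Int) (left r : Nat) (hlr : left ≤ r) :
    (pvCand f left (r + 1)).reverse =
      r :: ((pvCand f left r).reverse.dropWhile (fun i => decide (f i < f r))) := by
  have h1 : pvCand f left (r + 1)
      = (pvCand f left r).filter (fun i => decide (f r ≤ f i)) ++ [r] := by
    unfold pvCand
    rw [List.range_succ, List.filter_append, List.filter_filter]
    congr 1
    · apply List.filter_congr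
      intro i hi
      simp only [List.mem_range] at hi
      have hiff : (∀ j ∈ List.range r ++ [r], i < j → f j ≤ f i) ↔
          ((∀ j ∈ List.range r, i < j → f j ≤ f i) ∧ f r ≤ f i) := by
        simp only [List.mem_append, List.mem_range, List.mem_singleton]
        constructor
        · exact fun h => ⟨fun j hj hij => h j (Or.inl hj) hij, h r (Or.inr rfl) hi⟩
        · rintro ⟨h, hr'⟩ j hj hij
          rcases hj with h' | h'
          · exact h j h' hij
          · subst h'; exact hr'
      rw [decide_eq_decide.mpr hiff, Bool.decide_and]
      cases decide (left ≤ i) <;> cases decide (f r ≤ f i) <;>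
        cases decide (∀ j ∈ List.range r, i < j → f j ≤ f i) <;> rfl
    · simp only [List.filter_cons, List.filter_nil]
      simp [hlr]
      intro j hj hrj
      exfalso; omega
  rw [h1, List.reverse_append]
  simp only [List.reverse_cons, List.reverse_nil, List.nil_append, List.cons_append,
    List.cons.injEq, true_and]
  rw [← List.filter_reverse]
  rw [pv_dropWhile_eq_filter (p := fun i => decide (f i < f r))]
  · apply List.filter_congr
    intro i _
    rcases le_or_gt (f r) (f i) with h | h
    · simp [h, not_lt.mpr h]
    · simp [h, not_le.mpr h]
  · have := (List.pairwise_reverse (l := pvCand f left r)).mpr (pvCand_anti f left r)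
    exact this.imp (fun {a b} hab hb => by
      simp only [decide_eq_true_eq] at *
      omega)

-- incrementing left: drops exactly the front, and only when the front is left
lemma pvCand_succ_left (f : Nat → Int) (left r : Nat) :
    pvCand f (left + 1) r = (pvCand f left r).filter (fun i => decide (left + 1 ≤ i)) := by
  unfold pvCand
  rw [List.filter_filter]
  apply List.filter_congr
  intro i _
  by_cases h : left + 1 ≤ i
  · simp [h, show left ≤ i by omega]
  · simp [h]

-- incrementing left pops exactly the deque front, and only when that front equals left
lemma pvCand_pop (f : Nat → Int) (left r i0 : Nat)
    (hi0 : (pvCand f left r).head? = some i0) :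
    (if i0 = left then (pvCand f left r).reverse.dropLast else (pvCand f left r).reverse)
      = (pvCand f (left + 1) r).reverse := by
  rw [pvCand_succ_left]
  cases hc : pvCand f left r with
  | nil => simp [hc] at hi0
  | cons a tl =>
    rw [hc] at hi0
    have ha : a = i0 := by simpa using hi0
    subst ha
    have hsort := pvCand_sorted f left r
    rw [hc, List.pairwise_cons] at hsort
    have hmema : left ≤ a := by
      have := pvCand_mem (hc ▸ List.mem_cons_self (a := a) (l := tl))
      exact this.1
    have hmemtl : ∀ b ∈ tl, left ≤ b := by
      intro b hb
      have := pvCand_mem (hc ▸ List.mem_cons_of_mem a hb)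
      exact this.1
    by_cases h : a = left
    · subst h
      have h1 : (a :: tl).filter (fun i => decide (a + 1 ≤ i)) = tl := by
        simp only [List.filter_cons]
        have : ¬ (a + 1 ≤ a) := by omega
        simp only [this, decide_false]
        exact List.filter_eq_self.mpr (fun b hb => by
          simp only [decide_eq_true_eq]
          exact hsort.1 b hb)
      rw [h1, if_pos rfl, List.reverse_cons, List.dropLast_concat]
    · rw [if_neg h]
      congr 1
      symm
      apply List.filter_eq_self.mpr
      intro b hb
      simp only [decide_eq_true_eq]
      rcases List.mem_cons.mp hb with h' | h'
      · subst h'; omega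
      · have := hsort.1 b h'
        omega

lemma pvCand_ne_nil {f : Nat → Int} {left r : Nat} (h : left < r) :
    pvCand f left r ≠ [] := by
  intro hnil
  have hmem : r - 1 ∈ pvCand f left r := by
    unfold pvCand
    refine List.mem_filter.mpr ⟨List.mem_range.mpr (by omega), ?_⟩
    simp only [Bool.and_eq_true, decide_eq_true_eq, List.mem_range]
    exact ⟨by omega, fun j hj hij => absurd hj (by omega)⟩
  simp [hnil] at hmem

-- the head of the candidate list (= Python's dq[0]) carries the maximum of the window
lemma pvCand_head_max {f : Nat → Int} {left r i0 : Nat}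
    (h : (pvCand f left r).head? = some i0) :
    left ≤ i0 ∧ i0 < r ∧ ∀ k, left ≤ k → k < r → f k ≤ f i0 := by
  have hi0mem : i0 ∈ pvCand f left r := List.mem_of_mem_head? (by simp [h])
  obtain ⟨hli0, hi0r, hQ⟩ := pvCand_mem hi0mem
  -- an argmax of the window exists (Python's max over the nonempty index list)
  have hidx : (List.range' left (r - left)) ≠ [] := by
    intro hnil
    have := congrArg List.length hnil
    simp at this
    omega
  obtain ⟨ks, hks⟩ : ∃ ks, PySem.List.max? (List.range' left (r - left)) f = some ks := by
    cases hm : PySem.List.max? (List.range' left (r - left)) f with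
    | none => exact absurd ((PySem.List.max?_eq_none_iff _ _).mp hm) hidx
    | some k => exact ⟨k, rfl⟩
  have hksmem := PySem.List.max?_mem hks
  have hksmax := PySem.List.max?_isMax hks
  have hksrange : left ≤ ks ∧ ks < r := by
    rcases List.mem_range'.mp hksmem with ⟨i, hi, hieq⟩
    omega
  have hmemidx : ∀ k, left ≤ k → k < r → k ∈ List.range' left (r - left) := by
    intro k h1 h2
    exact List.mem_range'.mpr ⟨k - left, by omega, by omega⟩
  -- ks is a deque candidate
  have hkscand : ks ∈ pvCand f left r := by
    unfold pvCand
    refine List.mem_filter.mpr ⟨List.mem_range.mpr hksrange.2, ?_⟩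
    simp only [Bool.and_eq_true, decide_eq_true_eq, List.mem_range]
    refine ⟨hksrange.1, fun j hj hij => ?_⟩
    exact hksmax j (hmemidx j (by omega) hj)
  -- the head is the least candidate
  have hle : i0 ≤ ks := by
    cases hc : pvCand f left r with
    | nil => simp [hc] at h
    | cons a tl =>
      rw [hc] at h hkscand
      have ha : a = i0 := by simpa using h
      subst ha
      have hsort := pvCand_sorted f left r
      rw [hc, List.pairwise_cons] at hsort
      rcases List.mem_cons.mp hkscand with h' | h'
      · omega
      · exact Nat.le_of_lt (hsort.1 ks h')
  have hmax_i0 : f ks ≤ f i0 := by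
    rcases Nat.lt_or_ge i0 ks with h' | h'
    · exact hQ ks h' hksrange.2
    · have : i0 = ks := by omega
      subst this; exact le_refl _
  exact ⟨hli0, hi0r, fun k h1 h2 => le_trans (hksmax k (hmemidx k h1 h2)) hmax_i0⟩

lemma pvWin_mem {f : Nat → Int} {l r : Nat} {y : Int} :
    y ∈ pvWin f l r ↔ ∃ k, l ≤ k ∧ k < r ∧ y = f k := by
  unfold pvWin
  simp only [List.mem_map, List.mem_range']
  constructor
  · rintro ⟨a, ⟨i, hi, rfl⟩, rfl⟩
    exact ⟨l + 1 * i, by omega, by omega, rfl⟩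
  · rintro ⟨k, h1, h2, rfl⟩
    exact ⟨k, ⟨k - l, by omega, by omega⟩, rfl⟩

lemma pvWin_cons {f : Nat → Int} {l r : Nat} (h : l ≤ r) :
    pvWin f l (r + 1) = f l :: pvWin f (l + 1) (r + 1) := by
  unfold pvWin
  rw [show r + 1 - l = (r - l) + 1 by omega, List.range'_succ,
    show r + 1 - (l + 1) = r - l by omega]
  simp

lemma pvWin_append {f : Nat → Int} {l r : Nat} (h : l ≤ r) :
    pvWin f l r ++ [f r] = pvWin f l (r + 1) := by
  unfold pvWin
  rw [show r + 1 - l = (r - l) + 1 by omega, List.range'_concat]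
  simp
  rw [show l + (r - l) = r by omega]

-- the shrink loops agree and preserve the characterisation
lemma pvShrink_eq (nums : List Int) (limit : Int) (hl : 0 ≤ limit) :
    ∀ (fuel left r : Nat), left ≤ r → r + 1 - left ≤ fuel →
    ∃ left', left' ≤ r ∧
      pvShrinkA nums limit fuel
          ((pvCand (fun i => nums.getD i 0) left (r + 1)).reverse)
          ((pvCand (fun i => -(nums.getD i 0)) left (r + 1)).reverse) left
        = ((pvCand (fun i => nums.getD i 0) left' (r + 1)).reverse,
           (pvCand (fun i => -(nums.getD i 0)) left' (r + 1)).reverse, left') ∧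
      pvShrinkB limit (pvWin (fun i => nums.getD i 0) left (r + 1))
        = pvWin (fun i => nums.getD i 0) left' (r + 1) := by
  intro fuel
  induction fuel with
  | zero => intro left r h1 h2; omega
  | succ fuel ih =>
    intro left r h1 h2
    have hltr1 : left < r + 1 := by omega
    obtain ⟨i0, hi0⟩ : ∃ i0, (pvCand (fun i => nums.getD i 0) left (r + 1)).head? = some i0 := by
      cases hc : (pvCand (fun i => nums.getD i 0) left (r + 1)).head? with
      | none => exact absurd (List.head?_eq_none_iff.mp hc) (pvCand_ne_nil hltr1)
      | some a => exact ⟨a, rfl⟩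
    obtain ⟨j0, hj0⟩ : ∃ j0, (pvCand (fun i => -(nums.getD i 0)) left (r + 1)).head? = some j0 := by
      cases hc : (pvCand (fun i => -(nums.getD i 0)) left (r + 1)).head? with
      | none => exact absurd (List.head?_eq_none_iff.mp hc) (pvCand_ne_nil hltr1)
      | some a => exact ⟨a, rfl⟩
    obtain ⟨h1i, h2i, hmaxi⟩ := pvCand_head_max hi0
    obtain ⟨h1j, h2j, hminj⟩ := pvCand_head_max hj0
    have hwcons := pvWin_cons (f := fun i => nums.getD i 0) (l := left) (r := r) h1
    -- Python's max(window) / min(window) are the deque fronts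
    have hMspec := PySem.List.max?_id_cons (nums.getD left 0)
      (pvWin (fun i => nums.getD i 0) (left + 1) (r + 1))
    have hmspec := PySem.List.min?_id_cons (nums.getD left 0)
      (pvWin (fun i => nums.getD i 0) (left + 1) (r + 1))
    have hMmax := PySem.List.max?_isMax hMspec
    have hMmem := PySem.List.max?_mem hMspec
    have hmmin := PySem.List.min?_isMin hmspec
    have hmmem := PySem.List.min?_mem hmspec
    rw [← hwcons] at hMmax hMmem hmmin hmmem
    have hM : (pvWin (fun i => nums.getD i 0) (left + 1) (r + 1)).foldl max (nums.getD left 0)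
        = nums.getD i0 0 := by
      apply le_antisymm
      · rcases pvWin_mem.mp hMmem with ⟨k, hk1, hk2, hk3⟩
        rw [hk3]
        exact hmaxi k hk1 hk2
      · exact hMmax _ (pvWin_mem.mpr ⟨i0, h1i, h2i, rfl⟩)
    have hm : (pvWin (fun i => nums.getD i 0) (left + 1) (r + 1)).foldl min (nums.getD left 0)
        = nums.getD j0 0 := by
      apply le_antisymm
      · exact hmmin _ (pvWin_mem.mpr ⟨j0, h1j, h2j, rfl⟩)
      · rcases pvWin_mem.mp hmmem with ⟨k, hk1, hk2, hk3⟩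
        rw [hk3]
        have := hminj k hk1 hk2
        omega
    simp only [pvShrinkA, List.getLast?_reverse, hi0, hj0]
    rw [hwcons]
    simp only [pvShrinkB, PySem.List.max?_id_cons, PySem.List.min?_id_cons, hM, hm]
    by_cases hcond : nums.getD i0 0 - nums.getD j0 0 > limit
    · have hlr : left < r := by
        by_contra hcon
        have hi : i0 = r := by omega
        have hj : j0 = r := by omega
        rw [hi, hj] at hcond
        omega
      rw [if_pos hcond, if_pos hcond]
      rw [pvCand_pop _ _ _ _ hi0, pvCand_pop _ _ _ _ hj0]
      obtain ⟨left', hle', hA, hB⟩ := ih (left + 1) r (by omega) (by omega)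
      exact ⟨left', hle', hA, hB⟩
    · rw [if_neg hcond, if_neg hcond]
      exact ⟨left, by omega, rfl, hwcons.symm⟩

lemma pv_main (nums : List Int) (limit : Int) (hl : 0 ≤ limit) :
    ∀ r, r ≤ nums.length →
    ∃ left ans, left ≤ r ∧
      (List.range r).foldl (pvStepA nums limit) ([], [], 0, 0)
        = ((pvCand (fun i => nums.getD i 0) left r).reverse,
           (pvCand (fun i => -(nums.getD i 0)) left r).reverse, left, ans) ∧
      (List.range r).foldl (fun st i => pvStepB limit st (nums.getD i 0)) ([], 0)
        = (pvWin (fun i => nums.getD i 0) left r, ans) := by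
  intro r
  induction r with
  | zero =>
    intro _
    refine ⟨0, 0, le_refl 0, ?_, ?_⟩ <;> simp [pvCand, pvWin]
  | succ r ihr =>
    intro hr
    obtain ⟨left, ans, hlr, hA, hB⟩ := ihr (by omega)
    rw [List.range_succ]
    simp only [List.foldl_append, List.foldl_cons, List.foldl_nil]
    rw [hA, hB]
    simp only [pvStepA, pvStepB]
    have hfun : (fun i => decide (nums.getD r 0 < nums.getD i 0))
        = (fun i => decide (-nums.getD i 0 < -nums.getD r 0)) := by
      funext i
      exact decide_eq_decide.mpr (by omega)
    rw [hfun, ← pvCand_append (fun i => nums.getD i 0) left r hlr,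
      ← pvCand_append (fun i => -(nums.getD i 0)) left r hlr,
      pvWin_append hlr]
    obtain ⟨left', hle', hSA, hSB⟩ :=
      pvShrink_eq nums limit hl (nums.length + 1) left r hlr (by omega)
    rw [hSA, hSB]
    refine ⟨left', max ans ((r : Int) - (left' : Int) + 1), by omega, rfl, ?_⟩
    have hlen : ((pvWin (fun i => nums.getD i 0) left' (r + 1)).length : Int)
        = (r : Int) - (left' : Int) + 1 := by
      simp [pvWin]
      omega
    rw [hlen]

-- ===== VERDICT (by name: the statement is the Claim_ definition above) =====
theorem abs_diff_spec : Claim_equal_abs_diff := by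
  intro nums limit _ hpre
  unfold Spec_abs_diff
  rcases hpre with h | h
  · subst h; rfl
  · unfold abs_diff abs_diff_alt
    have hnums : nums = (List.range nums.length).map (fun i => nums.getD i 0) := by
      apply List.ext_getElem (by simp)
      intro i h1 h2
      simp [List.getElem?_eq_getElem h1]
    have hfold : nums.foldl (pvStepB limit) ([], 0)
        = (List.range nums.length).foldl (fun st i => pvStepB limit st (nums.getD i 0)) ([], 0) := by
      conv_lhs => rw [hnums]
      rw [List.foldl_map]
    obtain ⟨left, ans, _, hA, hB⟩ := pv_main nums limit h nums.length (le_refl _)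
    rw [hfold, hB, hA]
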